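-- pv_equiv track=rewrite | github.com/RaziqZaman/LaneChange | 00_dontuse_detect.py | lane_change_detected
-- ===== SOURCE A (Python) =====
-- from typing import Any, Dict, Iterable, List, Optional, Sequence, Tuple
--
-- def lane_change_detected(lane_ids: List[Optional[int]]) -> bool:
--     filtered = [lane for lane in lane_ids if lane is not None]
--     if len(filtered) < 2:
--         return False
--     first = filtered[0]
--     for lane in filtered[1:]:
--         if lane != first:
--             return True
--     return False
-- ===== SOURCE B (Python) =====
-- def lane_change_detected(lane_ids):
--     lo = hi = None
--     for lane in lane_ids:
--         if lane is None:
--             continue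
--         if lo is None or lane < lo:
--             lo = lane
--         if hi is None or lane > hi:
--             hi = lane
--     return lo is not None and lo < hi
-- ===== Notes on version B (the rewrite author's own statement) =====
-- stated objective: alternative
-- what changed: Replaces the filter-then-compare-each-against-the-first scan (with early exit) by a single pass maintaining running min and max of the non-None lane ids; a change is detected iff min < max.
import Mathlib
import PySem

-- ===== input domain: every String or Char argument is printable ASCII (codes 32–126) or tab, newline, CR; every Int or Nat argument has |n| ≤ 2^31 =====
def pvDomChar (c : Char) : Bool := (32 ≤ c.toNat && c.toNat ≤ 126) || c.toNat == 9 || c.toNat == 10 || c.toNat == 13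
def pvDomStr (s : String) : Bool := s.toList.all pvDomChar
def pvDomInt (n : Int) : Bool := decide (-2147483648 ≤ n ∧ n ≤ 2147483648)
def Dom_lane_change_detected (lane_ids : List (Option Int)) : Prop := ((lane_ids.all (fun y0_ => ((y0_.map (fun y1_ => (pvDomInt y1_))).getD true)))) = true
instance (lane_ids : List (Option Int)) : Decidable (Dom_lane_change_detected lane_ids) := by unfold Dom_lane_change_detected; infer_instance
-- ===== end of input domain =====

-- B replaces A's filter + compare-against-first scan by one pass keeping running min/max of the non-None ids (alternative, same cost).

-- ===== PORT A =====
-- the 'for lane in filtered[1:]: if lane != first: return True' loop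
def laneScan (first : Int) : List Int → Bool
  | [] => false
  | lane :: rest => if lane ≠ first then true else laneScan first rest

def lane_change_detected (lane_ids : List (Option Int)) : Bool :=
  let filtered := lane_ids.filterMap id
  if filtered.length < 2 then false
  else
    match filtered with
    | [] => false
    | first :: rest => laneScan first rest

-- ===== PORT B =====
-- one step of B's loop: update (lo, hi) with the next lane id
def laneStep (st : Option Int × Option Int) (lane : Option Int) : Option Int × Option Int :=
  match lane with
  | none => st
  | some v =>
    let lo := match st.1 with
      | none => some v
      | some l => if v < l then some v else some l
    let hi := match st.2 with
      | none => some v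
      | some h => if v > h then some v else some h
    (lo, hi)

def lane_change_detected_alt (lane_ids : List (Option Int)) : Bool :=
  match lane_ids.foldl laneStep (none, none) with
  | (some lo, some hi) => decide (lo < hi)
  | _ => false

-- ===== PRECONDITION & SPEC =====
def Spec_lane_change_detected (lane_ids : List (Option Int)) (out : Bool) : Prop := out = lane_change_detected_alt lane_ids
instance (lane_ids : List (Option Int)) (out : Bool) : Decidable (Spec_lane_change_detected lane_ids out) := by unfold Spec_lane_change_detected; infer_instance

-- ===== CLAIM (what is proved, stated in full; the proofs are below) =====
def Claim_equal_lane_change_detected : Prop := ∀ (lane_ids : List (Option Int)), Dom_lane_change_detected lane_ids → Spec_lane_change_detected lane_ids (lane_change_detected lane_ids)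

-- ===== LEMMAS AND PROOFS =====

lemma laneScan_eq_any (first : Int) (xs : List Int) :
    laneScan first xs = xs.any (fun x => x ≠ first) := by
  induction xs with
  | nil => rfl
  | cons x xs ih =>
    simp only [laneScan, List.any_cons, ih]
    by_cases h : x = first <;> simp [h]

-- the None entries are skipped: the fold over lane_ids is the fold over the filtered ints
lemma foldl_laneStep_filterMap (lane_ids : List (Option Int)) (st : Option Int × Option Int) :
    lane_ids.foldl laneStep st
      = (lane_ids.filterMap id).foldl (fun s v => laneStep s (some v)) st := by
  induction lane_ids generalizing st with
  | nil => rfl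
  | cons x xs ih =>
    cases x with
    | none => simpa [laneStep] using ih st
    | some v => simp [ih]

-- on (some, some) states the step is (min, max)
lemma foldl_laneStep_some (xs : List Int) (a b : Int) :
    xs.foldl (fun s v => laneStep s (some v)) (some a, some b)
      = (some (xs.foldl min a), some (xs.foldl max b)) := by
  induction xs generalizing a b with
  | nil => rfl
  | cons x t ih =>
    have hlo : (if x < a then some x else some a) = some (min a x) := by
      rcases lt_or_ge x a with h | h
      · rw [if_pos h, min_eq_right h.le]
      · rw [if_neg (not_lt.2 h), min_eq_left h]
    have hhi : (if x > b then some x else some b) = some (max b x) := by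
      rcases lt_or_ge b x with h | h
      · rw [if_pos h, max_eq_right h.le]
      · rw [if_neg (not_lt.2 h), max_eq_left h]
    have hstep : laneStep (some a, some b) (some x) = (some (min a x), some (max b x)) := by
      simp [laneStep, hlo, hhi]
    rw [List.foldl_cons, hstep, ih]; rfl

lemma foldl_min_le_init (xs : List Int) (a : Int) : xs.foldl min a ≤ a := by
  induction xs generalizing a with
  | nil => simp
  | cons x t ih => exact le_trans (ih (min a x)) (min_le_left a x)

lemma foldl_min_le_mem (xs : List Int) (a x : Int) (hx : x ∈ xs) : xs.foldl min a ≤ x := by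
  induction xs generalizing a with
  | nil => simp at hx
  | cons y t ih =>
    rcases List.mem_cons.1 hx with h | h
    · subst h; exact le_trans (foldl_min_le_init t _) (min_le_right a x)
    · exact ih _ h

lemma init_le_foldl_max (xs : List Int) (a : Int) : a ≤ xs.foldl max a := by
  induction xs generalizing a with
  | nil => simp
  | cons x t ih => exact le_trans (le_max_left a x) (ih (max a x))

lemma mem_le_foldl_max (xs : List Int) (a x : Int) (hx : x ∈ xs) : x ≤ xs.foldl max a := by
  induction xs generalizing a with
  | nil => simp at hx
  | cons y t ih =>
    rcases List.mem_cons.1 hx with h | h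
    · subst h; exact le_trans (le_max_right a x) (init_le_foldl_max t _)
    · exact ih _ h

lemma foldl_min_const (xs : List Int) (a : Int) (h : ∀ x ∈ xs, x = a) : xs.foldl min a = a := by
  induction xs with
  | nil => rfl
  | cons x t ih =>
    have hx := h x (by simp)
    subst hx
    simp only [List.foldl_cons, min_self]
    exact ih (fun y hy => h y (by simp [hy]))

lemma foldl_max_const (xs : List Int) (a : Int) (h : ∀ x ∈ xs, x = a) : xs.foldl max a = a := by
  induction xs with
  | nil => rfl
  | cons x t ih =>
    have hx := h x (by simp)
    subst hx
    simp only [List.foldl_cons, max_self]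
    exact ih (fun y hy => h y (by simp [hy]))

lemma min_lt_max_iff (first : Int) (rest : List Int) :
    (rest.foldl min first < rest.foldl max first) ↔ ∃ x ∈ rest, x ≠ first := by
  constructor
  · intro hlt
    by_contra hno
    push Not at hno
    rw [foldl_min_const rest first hno, foldl_max_const rest first hno] at hlt
    exact lt_irrefl _ hlt
  · rintro ⟨x, hx, hne⟩
    rcases lt_or_gt_of_ne hne with h | h
    · exact lt_of_le_of_lt (foldl_min_le_mem rest first x hx)
        (lt_of_lt_of_le h (init_le_foldl_max rest first))
    · exact lt_of_le_of_lt (foldl_min_le_init rest first)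
        (lt_of_lt_of_le h (mem_le_foldl_max rest first x hx))

-- ===== VERDICT (by name: the statement is the Claim_ definition above) =====
theorem lane_change_detected_spec : Claim_equal_lane_change_detected := by
  intro lane_ids _
  unfold Spec_lane_change_detected lane_change_detected lane_change_detected_alt
  rw [foldl_laneStep_filterMap]
  cases hf : lane_ids.filterMap id with
  | nil => simp
  | cons first rest =>
    have h0 : laneStep ((none : Option Int), (none : Option Int)) (some first)
        = (some first, some first) := rfl
    rw [List.foldl_cons, h0, foldl_laneStep_some]
    cases rest with
    | nil => simp
    | cons y ys =>
      simp only [List.length_cons]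
      rw [if_neg (by omega)]
      rw [laneScan_eq_any, Bool.eq_iff_iff]
      simp only [List.any_eq_true, decide_eq_true_eq]
      exact (min_lt_max_iff first (y :: ys)).symm
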